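-- pv_equiv track=rewrite | github.com/eightyeighteyes/adventofcode-2016-py | twentysixteen/code/day16.py | make_checksum
-- ===== SOURCE A (Python) =====
-- def make_checksum(data):
--     pairs = [data[i:i + 2] for i, d in enumerate(data) if not i % 2]
--     checksum = ''
--     for pair in pairs:
--         if pair[0] == pair[1]:
--             checksum += '1'
--         else:
--             checksum += '0'
--     if not len(checksum) % 2:
--         checksum = make_checksum(checksum)
--     return checksum
-- ===== SOURCE B (Python) =====
-- def make_checksum(data):
--     result = data
--     while True:
--         result = ''.join('1' if result[i] == result[i + 1] else '0'
--                          for i in range(0, len(result), 2))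
--         if len(result) % 2 == 1:
--             return result
-- ===== Notes on version B (the rewrite author's own statement) =====
-- stated objective: simpler
-- what changed: A's tail recursion (pairs built by enumerate slicing, an accumulating '+=' loop, then a recursive call while the checksum length is even) becomes a do-while loop that repeatedly halves the string in one str.join over directly indexed character pairs until the length is odd.
import Mathlib
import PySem

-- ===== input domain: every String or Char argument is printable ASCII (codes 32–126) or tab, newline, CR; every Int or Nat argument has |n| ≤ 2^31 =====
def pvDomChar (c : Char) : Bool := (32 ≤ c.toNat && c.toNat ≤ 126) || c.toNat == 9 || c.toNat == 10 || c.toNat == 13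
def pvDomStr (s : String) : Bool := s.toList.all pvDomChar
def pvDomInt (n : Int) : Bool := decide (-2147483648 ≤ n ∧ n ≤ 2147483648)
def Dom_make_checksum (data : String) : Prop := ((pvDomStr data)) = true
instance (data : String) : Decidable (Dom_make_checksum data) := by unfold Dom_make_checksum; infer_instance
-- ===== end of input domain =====

-- B replaces A's tail recursion (pairs built by enumerate slicing, then an accumulating loop, then recurse
-- while the length is even) by a do-while loop pairing characters by direct indexing — a simpler decomposition
-- of the same reduction.

-- ===== PORT A =====
-- fuel = remaining recursion depth (data.length suffices: the string halves each call; Python's infinite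
-- recursion on "" is cut off by fuel 0 — outside Pre_); pyGetD's default stands for pair[1] where Python
-- raises IndexError on an odd-length string — also outside Pre_.
def make_checksum_go : Nat → List Char → List Char
  | 0, _ => []
  | fuel + 1, data =>
    let pairs := ((PySem.List.enumerate data 0).filter
        (fun p => PySem.Int.mod p.1 2 == 0)).map
        (fun p => PySem.List.slice data (some p.1) (some (p.1 + 2)))
    let checksum := pairs.foldl (fun acc pair =>
        if PySem.List.pyGetD pair 0 '?' == PySem.List.pyGetD pair 1 '?'
        then acc ++ ['1'] else acc ++ ['0']) []
    if checksum.length % 2 = 0 then make_checksum_go fuel checksum else checksum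

def make_checksum (data : String) : String :=
  String.ofList (make_checksum_go data.toList.length data.toList)

-- ===== PORT B =====
-- the 'while True: reduce; if odd length: return' loop, with the same fuel bound (the pass halves the
-- length; on "" Python loops forever — outside Pre_); pyGetD's default stands for result[i+1] where
-- Python raises IndexError on an odd-length string — also outside Pre_.
def make_checksum_alt_go : Nat → List Char → List Char
  | 0, result => result
  | fuel + 1, result =>
    let next := (PySem.List.pyRange 0 (PySem.List.len result) 2).map
        (fun i => if PySem.List.pyGetD result i '?' == PySem.List.pyGetD result (i + 1) '?'
                  then '1' else '0')
    if next.length % 2 = 1 then next else make_checksum_alt_go fuel next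

def make_checksum_alt (data : String) : String :=
  String.ofList (make_checksum_alt_go data.toList.length data.toList)

-- ===== PRECONDITION & SPEC =====
-- Pre_ excludes exactly the inputs where Python A (and B) does not return: odd length (IndexError on the
-- one-character last pair) and the empty string (infinite recursion / infinite loop).
def Pre_make_checksum (data : String) : Prop :=
  data.toList.length % 2 = 0 ∧ data.toList ≠ []
instance (data : String) : Decidable (Pre_make_checksum data) := by unfold Pre_make_checksum; infer_instance
def pvWitness_make_checksum : String := "1100"

def Spec_make_checksum (data : String) (out : String) : Prop := out = make_checksum_alt data
instance (data : String) (out : String) : Decidable (Spec_make_checksum data out) := by unfold Spec_make_checksum; infer_instance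

-- ===== CLAIM (what is proved, stated in full; the proofs are below) =====
def Claim_equal_make_checksum : Prop := ∀ (data : String), Dom_make_checksum data → Pre_make_checksum data → Spec_make_checksum data (make_checksum data)

-- ===== LEMMAS AND PROOFS =====

-- the even indices of range(2m) are 2·range(m)
lemma pv_filter_even (m : Nat) :
    (PySem.List.pyRange 0 ((2 * m : Nat) : Int) 1).filter (fun j => PySem.Int.mod j 2 == 0)
      = (PySem.List.pyRange 0 (m : Nat) 1).map (fun k => 2 * k) := by
  induction m with
  | zero => simp [PySem.List.pyRange_one_eq_nil]
  | succ m ih =>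
      have h1 : ((2 * (m + 1) : Nat) : Int) = ((2 * m : Nat) : Int) + 1 + 1 := by push_cast; ring
      have h2 : ((m + 1 : Nat) : Int) = ((m : Nat) : Int) + 1 := by push_cast; ring
      rw [h1, PySem.List.pyRange_one_succ_right (by positivity),
          PySem.List.pyRange_one_succ_right (by positivity),
          h2, PySem.List.pyRange_one_succ_right (by positivity)]
      simp only [List.filter_append, List.map_append, ih]
      simp

-- range(0, 2m, 2) is 2·range(m)
lemma pv_range_two (m : Nat) :
    PySem.List.pyRange 0 ((2 * m : Nat) : Int) 2
      = (PySem.List.pyRange 0 (m : Nat) 1).map (fun k => 2 * k) := by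
  rw [PySem.List.pyRange_of_pos 0 _ (by omega : (0:Int) < 2), PySem.List.pyRange_one, List.map_map]
  rcases Nat.eq_zero_or_pos m with h | h
  · subst h; simp
  · rw [if_pos (by push_cast; omega),
        show ((((2 * m : Nat) : Int) - 0 + 2 - 1) / 2).toNat = (((m : Nat) : Int) - 0).toNat from by
          push_cast; omega]
    apply List.map_congr_left
    intro k _
    simp

lemma pv_slice_get (l : List Char) (a : Nat) :
    PySem.List.pyGetD (PySem.List.slice l (some (a : Int)) (some ((a : Int) + 2))) 0 '?' = l.getD a '?'
    ∧ PySem.List.pyGetD (PySem.List.slice l (some (a : Int)) (some ((a : Int) + 2))) 1 '?' = l.getD (a + 1) '?' := by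
  have hs : PySem.List.slice l (some (a : Int)) (some ((a : Int) + 2)) = (l.drop a).take 2 := by
    rw [show ((a : Int) + 2) = ((a + 2 : Nat) : Int) from by push_cast; ring, PySem.List.slice_natCast]
    congr 1; omega
  constructor
  · rw [hs, show (0:Int) = ((0:Nat):Int) from rfl, PySem.List.pyGetD_natCast]
    simp [List.getD, List.getElem?_drop]
  · rw [hs, show (1:Int) = ((1:Nat):Int) from rfl, PySem.List.pyGetD_natCast]
    simp [List.getD, List.getElem?_drop]

-- A's one reduction pass (pairs + accumulating loop) equals B's one loop-body pass, on even length
lemma pv_step_eq (l : List Char) (m : Nat) (hm : l.length = 2 * m) :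
    (((PySem.List.enumerate l 0).filter (fun p => PySem.Int.mod p.1 2 == 0)).map
        (fun p => PySem.List.slice l (some p.1) (some (p.1 + 2)))).foldl
        (fun acc pair => if PySem.List.pyGetD pair 0 '?' == PySem.List.pyGetD pair 1 '?'
          then acc ++ ['1'] else acc ++ ['0']) []
    = (PySem.List.pyRange 0 (PySem.List.len l) 2).map
        (fun i => if PySem.List.pyGetD l i '?' == PySem.List.pyGetD l (i + 1) '?'
                  then '1' else '0') := by
  have hn : PySem.List.len l = ((2 * m : Nat) : Int) := by simp [PySem.List.len_eq, hm]
  have hfun : (fun (acc : List Char) (pair : List Char) =>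
      if PySem.List.pyGetD pair 0 '?' == PySem.List.pyGetD pair 1 '?' then acc ++ ['1'] else acc ++ ['0'])
      = (fun acc pair => acc ++ [if PySem.List.pyGetD pair 0 '?' == PySem.List.pyGetD pair 1 '?'
          then '1' else '0']) := by
    funext acc pair; split <;> rfl
  rw [hfun, PySem.List.foldl_append_singleton_eq_map, List.nil_append,
      PySem.List.enumerate_eq_map_pyRange (d := '?'), List.filter_map, List.map_map, List.map_map,
      hn, pv_range_two m]
  simp only [Function.comp_def]
  rw [pv_filter_even m, List.map_map, List.map_map]
  apply List.map_congr_left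
  intro k hk
  have hk0 : 0 ≤ k := (PySem.List.mem_pyRange_one.mp hk).1
  obtain ⟨a, rfl⟩ := Int.eq_ofNat_of_zero_le hk0
  have hc : (2 * ((a : Nat) : Int)) = ((2 * a : Nat) : Int) := by push_cast; ring
  simp only [Function.comp_def, hc, (pv_slice_get l (2 * a)).1, (pv_slice_get l (2 * a)).2]
  have g1 : PySem.List.pyGetD l (((2 * a : Nat) : Int)) '?' = l.getD (2 * a) '?' := by
    rw [PySem.List.pyGetD_natCast]
  have g2 : PySem.List.pyGetD l (((2 * a : Nat) : Int) + 1) '?' = l.getD (2 * a + 1) '?' := by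
    rw [show ((2 * a : Nat) : Int) + 1 = ((2 * a + 1 : Nat) : Int) from by push_cast; ring,
        PySem.List.pyGetD_natCast]
  rw [g1, g2]

-- length of one pass over an even-length string
lemma pv_step_len (l : List Char) (m : Nat) (hm : l.length = 2 * m) (f : Int → Char) :
    ((PySem.List.pyRange 0 (PySem.List.len l) 2).map f).length = m := by
  rw [show PySem.List.len l = ((2 * m : Nat) : Int) from by simp [PySem.List.len_eq, hm],
      pv_range_two m, List.length_map, List.length_map, PySem.List.length_pyRange_one]
  omega

lemma pv_go_eq : ∀ (fA fB : Nat) (l : List Char), l.length % 2 = 0 → 0 < l.length →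
    l.length ≤ fA → l.length ≤ fB → make_checksum_go fA l = make_checksum_alt_go fB l := by
  intro fA
  induction fA with
  | zero => intro fB l he hp hA hB; omega
  | succ fA ih =>
    intro fB l he hp hA hB
    obtain ⟨m, hm⟩ : ∃ m, l.length = 2 * m := ⟨l.length / 2, by omega⟩
    obtain ⟨fB', rfl⟩ : ∃ b, fB = b + 1 := ⟨fB - 1, by omega⟩
    simp only [make_checksum_go, make_checksum_alt_go]
    rw [pv_step_eq l m hm]
    have hcl := pv_step_len l m hm
      (fun i => if PySem.List.pyGetD l i '?' == PySem.List.pyGetD l (i + 1) '?' then '1' else '0')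
    by_cases hpar : m % 2 = 0
    · rw [if_pos (by rw [hcl]; exact hpar), if_neg (by rw [hcl]; omega)]
      exact ih fB' _ (by rw [hcl]; exact hpar) (by rw [hcl]; omega) (by rw [hcl]; omega)
        (by rw [hcl]; omega)
    · rw [if_neg (by rw [hcl]; omega), if_pos (by rw [hcl]; omega)]

-- ===== VERDICT (by name: the statement is the Claim_ definition above) =====
theorem make_checksum_spec : Claim_equal_make_checksum := by
  intro data _ hpre
  unfold Spec_make_checksum make_checksum make_checksum_alt
  obtain ⟨he, hne⟩ := hpre
  rw [pv_go_eq data.toList.length data.toList.length data.toList he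
    (List.length_pos_iff.mpr hne) le_rfl le_rfl]
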